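-- pv_equiv track=rewrite | github.com/ppanzhang/Code-Room | DOAP_tools.py | Check_Is_Valid_String
-- ===== SOURCE A (Python) =====
-- def Check_Is_Valid_String(check_list):
--     find_flag = False
--     check_result = True
--     for item in check_list:
--         if (item == 0):
--             find_flag = True
--             break
--     if (find_flag == True):
--         last_idx = check_list.index(0)
--         if (last_idx != 0):
--             string_list = check_list[:last_idx]
--             zero_list = check_list[last_idx + 1:]
--             for item in zero_list:
--                 if (item != 0):
--                     return False
--             for item in string_list:
--                 if (item < 32 or item > 126):
--                     return False
--         else:
--             return False
--     else:
--         for item in check_list: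
--             if (item < 32 or item > 126):
--                 return False
--     return check_result
-- ===== SOURCE B (Python) =====
-- def Check_Is_Valid_String(check_list):
--     # single-pass state machine: printable phase, then (optionally) zero phase
--     in_zero = False
--     seen_string = False
--     for item in check_list:
--         if in_zero:
--             if item != 0:
--                 return False
--         elif item == 0:
--             if not seen_string:
--                 return False
--             in_zero = True
--         elif item < 32 or item > 126:
--             return False
--         else:
--             seen_string = True
--     return True
-- ===== Notes on version B (the rewrite author's own statement) =====
-- stated objective: simpler
-- what changed: Replaces A's scan-for-zero + list.index(0) + two slices + three separate loops by one single-pass state machine with two booleans (in_zero, seen_string).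
import Mathlib
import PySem

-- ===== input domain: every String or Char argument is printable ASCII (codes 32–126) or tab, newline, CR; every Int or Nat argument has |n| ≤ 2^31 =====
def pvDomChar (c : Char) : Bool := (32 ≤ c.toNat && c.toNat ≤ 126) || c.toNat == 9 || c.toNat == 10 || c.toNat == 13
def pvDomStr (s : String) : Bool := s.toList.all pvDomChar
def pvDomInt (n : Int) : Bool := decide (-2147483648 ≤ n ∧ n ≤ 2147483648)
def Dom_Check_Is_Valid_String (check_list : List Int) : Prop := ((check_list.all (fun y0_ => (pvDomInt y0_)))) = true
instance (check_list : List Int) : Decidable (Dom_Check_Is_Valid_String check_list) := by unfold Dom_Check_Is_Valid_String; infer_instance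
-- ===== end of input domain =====

-- B is a single-pass two-boolean state machine replacing A's scan + index + slices + three loops (objective: simpler).

-- ===== PORT A =====
-- the first for-loop with break: did we find a 0?
def pvFindZero : List Int → Bool
  | [] => false
  | x :: r => if x == 0 then true else pvFindZero r

-- 'for item in zero_list: if item != 0: return False'
def pvAllZeroLoop : List Int → Bool
  | [] => true
  | x :: r => if x ≠ 0 then false else pvAllZeroLoop r

-- 'for item in …: if item < 32 or item > 126: return False'
def pvPrintableLoop : List Int → Bool
  | [] => true
  | x :: r => if x < 32 ∨ x > 126 then false else pvPrintableLoop r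

def Check_Is_Valid_String (check_list : List Int) : Bool :=
  let find_flag := pvFindZero check_list
  let check_result := true
  if find_flag = true then
    match PySem.List.index? check_list 0 with
    | some last_idx =>
      if last_idx ≠ 0 then
        let string_list := PySem.List.slice check_list none (some (last_idx : Int))
        let zero_list := PySem.List.slice check_list (some ((last_idx : Int) + 1)) none
        if pvAllZeroLoop zero_list then
          if pvPrintableLoop string_list then check_result else false
        else false
      else false
    | none => false  -- unreachable: find_flag = true means 0 ∈ check_list, so .index(0) succeeds
  else
    if pvPrintableLoop check_list then check_result else false

-- ===== PORT B =====
def pvAltLoop : List Int → Bool → Bool → Bool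
  | [], _, _ => true
  | item :: rest, in_zero, seen_string =>
    if in_zero then
      if item ≠ 0 then false else pvAltLoop rest in_zero seen_string
    else if item = 0 then
      if !seen_string then false else pvAltLoop rest true seen_string
    else if item < 32 ∨ item > 126 then false
    else pvAltLoop rest in_zero true

def Check_Is_Valid_String_alt (check_list : List Int) : Bool :=
  pvAltLoop check_list false false

-- ===== PRECONDITION & SPEC =====
def Spec_Check_Is_Valid_String (check_list : List Int) (out : Bool) : Prop := out = Check_Is_Valid_String_alt check_list
instance (check_list : List Int) (out : Bool) : Decidable (Spec_Check_Is_Valid_String check_list out) := by unfold Spec_Check_Is_Valid_String; infer_instance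

-- ===== CLAIM (what is proved, stated in full; the proofs are below) =====
def Claim_equal_Check_Is_Valid_String : Prop := ∀ (check_list : List Int), Dom_Check_Is_Valid_String check_list → Spec_Check_Is_Valid_String check_list (Check_Is_Valid_String check_list)

-- ===== LEMMAS AND PROOFS =====

theorem pvFindZero_eq_false_iff (l : List Int) : pvFindZero l = false ↔ (0 : Int) ∉ l := by
  induction l with
  | nil => simp [pvFindZero]
  | cons x r ih =>
    simp only [pvFindZero, List.mem_cons]
    by_cases h : x = (0 : Int)
    · simp [h]
    · have h' : ¬((0 : Int) = x) := fun hh => h hh.symm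
      simp [h, h', ih]

-- in the zero phase B is exactly A's zero-list loop
theorem pvAltLoop_true (l : List Int) (s : Bool) : pvAltLoop l true s = pvAllZeroLoop l := by
  induction l with
  | nil => rfl
  | cons x r ih =>
    simp only [pvAltLoop, pvAllZeroLoop]
    by_cases h : x = (0 : Int) <;> simp [h, ih]

-- with no zero in sight B is exactly A's printable loop
theorem pvAltLoop_no_zero (l : List Int) (s : Bool) (h : (0 : Int) ∉ l) :
    pvAltLoop l false s = pvPrintableLoop l := by
  induction l generalizing s with
  | nil => rfl
  | cons x r ih =>
    have hx : x ≠ (0 : Int) := fun hx => h (by simp [hx])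
    have hr : (0 : Int) ∉ r := fun hr => h (List.mem_cons_of_mem _ hr)
    simp only [pvAltLoop, hx]
    by_cases hp : x < 32 ∨ x > 126 <;> simp [hp, ih _ hr, pvPrintableLoop]

-- running B through a nonempty zero-free prefix then the first 0
theorem pvAltLoop_cons_printable (x : Int) (rest : List Int) (s : Bool)
    (hx : x ≠ 0) (hp : ¬(x < 32 ∨ x > 126)) :
    pvAltLoop (x :: rest) false s = pvAltLoop rest false true := by
  simp [pvAltLoop, hx, hp]

-- running B through a nonempty zero-free prefix then the first 0
theorem pvAltLoop_pre (pre suf : List Int) (s : Bool) (hne : pre ≠ [])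
    (hnz : (0 : Int) ∉ pre) :
    pvAltLoop (pre ++ 0 :: suf) false s = (pvPrintableLoop pre && pvAllZeroLoop suf) := by
  induction pre generalizing s with
  | nil => exact absurd rfl hne
  | cons x r ih =>
    have hx : x ≠ (0 : Int) := fun hx => hnz (by simp [hx])
    have hr : (0 : Int) ∉ r := fun hr => hnz (List.mem_cons_of_mem _ hr)
    by_cases hp : x < 32 ∨ x > 126
    · simp [pvAltLoop, hx, hp, pvPrintableLoop]
    · rw [List.cons_append, pvAltLoop_cons_printable x _ s hx hp]
      cases r with
      | nil => simp [pvAltLoop, pvAltLoop_true, pvPrintableLoop, hp]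
      | cons y t =>
        rw [ih true (by simp) hr]
        simp [pvPrintableLoop, hp]

theorem Check_Is_Valid_String_eq (l : List Int) :
    Check_Is_Valid_String l = Check_Is_Valid_String_alt l := by
  unfold Check_Is_Valid_String Check_Is_Valid_String_alt
  by_cases hf : pvFindZero l = true
  · have hmem : (0 : Int) ∈ l := by
      by_contra hnm
      rw [(pvFindZero_eq_false_iff l).2 hnm] at hf
      exact absurd hf (by simp)
    have hsome : (PySem.List.index? l (0 : Int)).isSome := by
      rw [PySem.List.index?_isSome_iff]; exact hmem
    obtain ⟨k, hk⟩ := Option.isSome_iff_exists.mp hsome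
    obtain ⟨pre, suf, hsplit, hlen, hnz⟩ := (PySem.List.index?_eq_some_iff l 0 k).mp hk
    subst hsplit
    have hslice1 : PySem.List.slice (pre ++ 0 :: suf) none (some (k : Int)) = pre := by
      rw [PySem.List.slice_to_natCast, ← hlen, List.take_left]
    have hslice2 : PySem.List.slice (pre ++ 0 :: suf) (some ((k : Int) + 1)) none = suf := by
      have hcast : ((k : Int) + 1) = ((k + 1 : Nat) : Int) := by push_cast; ring
      have hlen' : (pre ++ [(0 : Int)]).length = k + 1 := by simp [hlen]
      rw [hcast, PySem.List.slice_from_natCast,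
        show pre ++ 0 :: suf = (pre ++ [(0 : Int)]) ++ suf by simp, ← hlen', List.drop_left]
    by_cases hk0 : k = 0
    · -- first element is 0: A returns False; B fails with seen_string = false
      subst hk0
      have hpre0 : pre = [] := List.eq_nil_of_length_eq_zero hlen
      subst hpre0
      have hk' : List.idxOf? (0 : Int) (0 :: suf) = some 0 := by
        simpa [PySem.List.index?_eq_idxOf?] using hk
      simp [pvFindZero, hk', pvAltLoop]
    · have hpre : pre ≠ [] := by
        intro h; apply hk0; rw [← hlen, h]; rfl
      simp only [hf, hk]
      rw [if_pos hk0, hslice1, hslice2, pvAltLoop_pre pre suf false hpre hnz]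
      cases pvAllZeroLoop suf <;> cases pvPrintableLoop pre <;> simp
  · have hnm : (0 : Int) ∉ l := (pvFindZero_eq_false_iff l).1 (by simpa using hf)
    simp only [hf, if_neg (by simp : ¬(false = true)), pvAltLoop_no_zero l false hnm]
    cases pvPrintableLoop l <;> simp

-- ===== VERDICT (by name: the statement is the Claim_ definition above) =====
theorem Check_Is_Valid_String_spec : Claim_equal_Check_Is_Valid_String := by
  intro l _
  unfold Spec_Check_Is_Valid_String
  exact Check_Is_Valid_String_eq l
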